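-- pv_equiv track=rewrite | github.com/MoutonBinoclard/Maths-Info-2025 | Sujet-d-oraux/24_Lafoy.py | liste_co
-- ===== SOURCE A (Python) =====
-- def liste_co(mot):
--     # Retourne la liste des coordonées
--     liste_co_x = [0]
--     liste_co_y = [0]
--     for lettre in mot :
--         if lettre == 'D':
--             liste_co_x.append(liste_co_x[-1]+1)
--             liste_co_y.append(liste_co_y[-1])
--         if lettre == 'H':
--             liste_co_x.append(liste_co_x[-1])
--             liste_co_y.append(liste_co_y[-1]+1)
--     return (liste_co_x, liste_co_y)
-- ===== SOURCE B (Python) =====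
-- def liste_co(mot):
--     # Closed-form decomposition: filter moves, then each coordinate list is a
--     # table of prefix counts (x_i = number of 'D' among the first i moves,
--     # y_i = i - x_i since every move is 'D' or 'H').
--     moves = [c for c in mot if c in 'DH']
--     n = len(moves)
--     liste_co_x = [moves[:i].count('D') for i in range(n + 1)]
--     liste_co_y = [i - x for i, x in enumerate(liste_co_x)]
--     return (liste_co_x, liste_co_y)
-- ===== Notes on version B (the rewrite author's own statement) =====
-- stated objective: alternative
-- what changed: Replaces A's incremental loop that appends last-element+1 to two growing coordinate lists with a closed-form decomposition: filter the move characters once, build the x list as a table of prefix counts of rightward moves, and derive each y entry as its index minus the x entry.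
import Mathlib
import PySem

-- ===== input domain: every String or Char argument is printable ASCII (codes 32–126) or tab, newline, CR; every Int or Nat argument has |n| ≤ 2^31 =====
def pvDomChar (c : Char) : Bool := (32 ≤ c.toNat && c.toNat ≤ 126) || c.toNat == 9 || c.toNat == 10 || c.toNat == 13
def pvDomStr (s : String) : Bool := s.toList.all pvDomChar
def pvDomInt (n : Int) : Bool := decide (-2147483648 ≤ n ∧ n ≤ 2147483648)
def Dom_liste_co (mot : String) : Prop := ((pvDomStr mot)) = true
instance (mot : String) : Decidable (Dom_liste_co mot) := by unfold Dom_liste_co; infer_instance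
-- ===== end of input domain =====

-- B replaces A's incremental last-element append loop by a closed-form prefix-count table (alternative decomposition, same cost class).

-- ===== PORT A =====
-- one loop iteration of A (two independent 'if's, as in the Python)
def pvStepA (st : List Int × List Int) (lettre : Char) : List Int × List Int :=
  let st :=
    if lettre = 'D' then
      (st.1 ++ [PySem.List.pyGetD st.1 (-1) 0 + 1], st.2 ++ [PySem.List.pyGetD st.2 (-1) 0])
    else st
  if lettre = 'H' then
    (st.1 ++ [PySem.List.pyGetD st.1 (-1) 0], st.2 ++ [PySem.List.pyGetD st.2 (-1) 0 + 1])
  else st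

def liste_co (mot : String) : List Int × List Int :=
  mot.toList.foldl pvStepA ([0], [0])

-- ===== PORT B =====
def liste_co_alt (mot : String) : List Int × List Int :=
  let moves := mot.toList.filter (fun c => c == 'D' || c == 'H')
  let n : Int := moves.length
  let xs := (PySem.List.pyRange 0 (n + 1) 1).map
    (fun i => ((PySem.List.slice moves none (some i)).count 'D' : Int))
  let ys := (PySem.List.enumerate xs 0).map (fun p => p.1 - p.2)
  (xs, ys)

-- ===== PRECONDITION & SPEC =====
def Spec_liste_co (mot : String) (out : List Int × List Int) : Prop := out = liste_co_alt mot
instance (mot : String) (out : List Int × List Int) : Decidable (Spec_liste_co mot out) := by unfold Spec_liste_co; infer_instance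

-- ===== CLAIM (what is proved, stated in full; the proofs are below) =====
def Claim_equal_liste_co : Prop := ∀ (mot : String), Dom_liste_co mot → Spec_liste_co mot (liste_co mot)

-- ===== LEMMAS AND PROOFS =====

-- the path from (x, y) through the remaining letters, built front-to-back
def pvT (x y : Int) : List Char → List Int × List Int
  | [] => ([x], [y])
  | c :: l =>
    if c = 'D' then
      let r := pvT (x + 1) y l
      (x :: r.1, y :: r.2)
    else if c = 'H' then
      let r := pvT x (y + 1) l
      (x :: r.1, y :: r.2)
    else pvT x y l

theorem pvFoldA (l : List Char) : ∀ (xs ys : List Int) (x y : Int),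
    List.foldl pvStepA (xs ++ [x], ys ++ [y]) l
      = (xs ++ (pvT x y l).1, ys ++ (pvT x y l).2) := by
  induction l with
  | nil => intro xs ys x y; simp [pvT]
  | cons c l ih =>
    intro xs ys x y
    rw [List.foldl_cons]
    by_cases hD : c = 'D'
    · rw [show pvStepA (xs ++ [x], ys ++ [y]) c = ((xs ++ [x]) ++ [x + 1], (ys ++ [y]) ++ [y])
        from by simp [pvStepA, hD, PySem.List.pyGetD_neg_one_append_singleton], ih]
      simp [pvT, hD]
    · by_cases hH : c = 'H'
      · rw [show pvStepA (xs ++ [x], ys ++ [y]) c = ((xs ++ [x]) ++ [x], (ys ++ [y]) ++ [y + 1])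
          from by simp [pvStepA, hH, PySem.List.pyGetD_neg_one_append_singleton], ih]
        simp [pvT, hD, hH]
      · rw [show pvStepA (xs ++ [x], ys ++ [y]) c = (xs ++ [x], ys ++ [y])
          from by simp [pvStepA, hD, hH], ih]
        simp [pvT, hD, hH]

theorem pvT_filter (l : List Char) : ∀ (x y : Int),
    pvT x y (l.filter (fun c => c == 'D' || c == 'H')) = pvT x y l := by
  induction l with
  | nil => intro x y; rfl
  | cons c l ih =>
    intro x y
    by_cases hD : c = 'D'
    · simp [List.filter_cons, hD, pvT, ih]
    · by_cases hH : c = 'H'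
      · simp [List.filter_cons, hD, hH, pvT, ih]
      · simp [List.filter_cons, hD, hH, pvT, ih]

theorem pvT_fst (m : List Char) : ∀ (x y : Int), (∀ c ∈ m, c = 'D' ∨ c = 'H') →
    (pvT x y m).1 = (List.range (m.length + 1)).map
      (fun k => x + ((m.take k).count 'D' : Int)) := by
  induction m with
  | nil => intro x y _; simp [pvT]
  | cons c m ih =>
    intro x y h
    have hm : ∀ c ∈ m, c = 'D' ∨ c = 'H' := fun d hd => h d (List.mem_cons_of_mem _ hd)
    have hrange : List.range ((c :: m).length + 1)
        = 0 :: (List.range (m.length + 1)).map (· + 1) := by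
      rw [List.length_cons, List.range_succ_eq_map]
    rw [hrange]
    rcases h c List.mem_cons_self with hD | hH
    · simp only [pvT, hD, if_pos, ih _ _ hm, List.map_cons, List.map_map]
      refine congrArg₂ List.cons (by simp) ?_
      exact List.map_congr_left fun k _ => by
        simp [Function.comp_def, List.count_cons]
        ring
    · have hD : ¬ c = 'D' := by rw [hH]; decide
      simp only [pvT, hD, hH, if_neg, if_pos, ite_false, ite_true, if_false, if_true,
        ih _ _ hm, List.map_cons, List.map_map]
      refine congrArg₂ List.cons (by simp) ?_
      exact List.map_congr_left fun k _ => by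
        simp [Function.comp_def, List.count_cons, hD]

theorem pvT_snd (m : List Char) : ∀ (x y : Int), (∀ c ∈ m, c = 'D' ∨ c = 'H') →
    (pvT x y m).2 = (List.range (m.length + 1)).map
      (fun k => y + ((m.take k).count 'H' : Int)) := by
  induction m with
  | nil => intro x y _; simp [pvT]
  | cons c m ih =>
    intro x y h
    have hm : ∀ c ∈ m, c = 'D' ∨ c = 'H' := fun d hd => h d (List.mem_cons_of_mem _ hd)
    have hrange : List.range ((c :: m).length + 1)
        = 0 :: (List.range (m.length + 1)).map (· + 1) := by
      rw [List.length_cons, List.range_succ_eq_map]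
    rw [hrange]
    rcases h c List.mem_cons_self with hD | hH
    · have hH : ¬ c = 'H' := by rw [hD]; decide
      simp only [pvT, hD, hH, if_pos, ih _ _ hm, List.map_cons, List.map_map]
      refine congrArg₂ List.cons (by simp) ?_
      exact List.map_congr_left fun k _ => by
        simp [Function.comp_def, List.count_cons, hH]
    · have hD : ¬ c = 'D' := by rw [hH]; decide
      simp only [pvT, hD, hH, if_neg, if_pos, ite_false, ite_true, ih _ _ hm,
        List.map_cons, List.map_map]
      refine congrArg₂ List.cons (by simp) ?_
      exact List.map_congr_left fun k _ => by
        simp [Function.comp_def, List.count_cons]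
        ring

theorem pvCountDH (m : List Char) (h : ∀ c ∈ m, c = 'D' ∨ c = 'H') :
    m.count 'D' + m.count 'H' = m.length := by
  induction m with
  | nil => rfl
  | cons c m ih =>
    have hm : ∀ c ∈ m, c = 'D' ∨ c = 'H' := fun d hd => h d (List.mem_cons_of_mem _ hd)
    have H := ih hm
    rcases h c List.mem_cons_self with hc | hc <;> subst hc <;>
      simp [List.count_cons] <;> omega

-- ===== VERDICT (by name: the statement is the Claim_ definition above) =====
theorem liste_co_spec : Claim_equal_liste_co := by
  intro mot _
  unfold Spec_liste_co liste_co liste_co_alt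
  dsimp only
  have h0 : (([0], [0]) : List Int × List Int) = ([] ++ [0], [] ++ [0]) := by simp
  rw [h0, pvFoldA, List.nil_append, List.nil_append, ← pvT_filter]
  set m := mot.toList.filter (fun c => c == 'D' || c == 'H') with hmdef
  have hm : ∀ c ∈ m, c = 'D' ∨ c = 'H' := by
    intro c hc
    rw [hmdef] at hc
    have := (List.mem_filter.mp hc).2
    rcases Bool.or_eq_true_iff.mp this with h | h
    · exact Or.inl (by exact_mod_cast beq_iff_eq.mp h)
    · exact Or.inr (by exact_mod_cast beq_iff_eq.mp h)
  rw [pvT_fst m 0 0 hm, pvT_snd m 0 0 hm]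
  have hxs : ((PySem.List.pyRange 0 ((m.length : Int) + 1) 1).map
      (fun i => ((PySem.List.slice m none (some i)).count 'D' : Int)))
      = (List.range (m.length + 1)).map (fun k => 0 + ((m.take k).count 'D' : Int)) := by
    rw [PySem.List.pyRange_one]
    have : ((((m.length : Int) + 1) - 0).toNat) = m.length + 1 := by omega
    rw [this, List.map_map]
    refine List.map_congr_left fun k _ => ?_
    simp [Function.comp_def, PySem.List.slice_to_natCast]
  refine Prod.ext ?_ ?_
  · exact hxs.symm
  · show (List.range (m.length + 1)).map (fun k => 0 + ((m.take k).count 'H' : Int)) = _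
    rw [hxs]
    rw [PySem.List.enumerate_eq_map_pyRange (d := 0)]
    rw [List.map_map]
    have hlen : (PySem.List.len ((List.range (m.length + 1)).map
        (fun k => 0 + ((m.take k).count 'D' : Int))) : Int) = (m.length : Int) + 1 := by
      simp [PySem.List.len]
    rw [hlen, PySem.List.pyRange_one]
    have h1 : ((((m.length : Int) + 1) - 0).toNat) = m.length + 1 := by omega
    rw [h1, List.map_map]
    refine List.map_congr_left fun k hk => ?_
    have hk' : k < m.length + 1 := List.mem_range.mp hk
    have hget : PySem.List.pyGetD ((List.range (m.length + 1)).map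
        (fun j => 0 + ((m.take j).count 'D' : Int))) ((0 : Int) + (k : Int)) 0
        = 0 + ((m.take k).count 'D' : Int) := by
      rw [zero_add, PySem.List.pyGetD_natCast]
      rw [List.getD_eq_getElem?_getD]
      simp [hk']
    simp only [Function.comp_def, hget]
    have hsub : ∀ c ∈ m.take k, c = 'D' ∨ c = 'H' :=
      fun c hc => hm c (List.mem_of_mem_take hc)
    have hcnt := pvCountDH (m.take k) hsub
    have hlen2 : (m.take k).length = k := by
      rw [List.length_take]; omega
    rw [hlen2] at hcnt
    omega
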